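-- pv_equiv track=rewrite | github.com/Digital-Ethos-Academy/220372-AG-AISOFTDEV-Team-2-CodeVoyagers | utils/plantuml.py | validate_plantuml_syntax
-- ===== SOURCE A (Python) =====
-- from typing import Optional, Union
--
-- def validate_plantuml_syntax(plantuml_text: str) -> tuple[bool, Optional[str]]:
--     """Validate PlantUML syntax (basic validation).
--
--     Parameters
--     ----------
--     plantuml_text : str
--         The PlantUML diagram text to validate.
--
--     Returns
--     -------
--     tuple[bool, Optional[str]]
--         A tuple of (is_valid, error_message).
--     """
--     text = plantuml_text.strip()
--
--     if not text:
--         return False, "Empty PlantUML text"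
--
--     # Check for required @startuml/@enduml tags
--     if not text.startswith('@startuml') and not text.startswith('@startmindmap') and not text.startswith('@startgantt'):
--         return False, "PlantUML diagram must start with @startuml, @startmindmap, or @startgantt"
--
--     if not text.endswith('@enduml') and not text.endswith('@endmindmap') and not text.endswith('@endgantt'):
--         return False, "PlantUML diagram must end with @enduml, @endmindmap, or @endgantt"
--
--     # Check for balanced parentheses/brackets
--     brackets = {'(': ')', '[': ']', '{': '}'}
--     stack = []
--
--     for char in text:
--         if char in brackets:
--             stack.append(brackets[char])
--         elif char in brackets.values():
--             if not stack or stack.pop() != char: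
--                 return False, "Unbalanced parentheses, brackets, or braces"
--
--     if stack:
--         return False, "Unbalanced parentheses, brackets, or braces"
--
--     return True, None
-- ===== SOURCE B (Python) =====
-- def _drop_pairs(s):
--     """One left-to-right pass removing non-overlapping adjacent matched pairs."""
--     out = []
--     i = 0
--     while i < len(s):
--         if i + 1 < len(s) and s[i] + s[i + 1] in ('()', '[]', '{}'):
--             i += 2
--         else:
--             out.append(s[i])
--             i += 1
--     return out
--
--
-- def validate_plantuml_syntax(plantuml_text: str):
--     text = plantuml_text.strip()
--     if not text:
--         return False, "Empty PlantUML text"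
--     if not text.startswith(('@startuml', '@startmindmap', '@startgantt')):
--         return False, "PlantUML diagram must start with @startuml, @startmindmap, or @startgantt"
--     if not text.endswith(('@enduml', '@endmindmap', '@endgantt')):
--         return False, "PlantUML diagram must end with @enduml, @endmindmap, or @endgantt"
--     # pair-elimination balance check: repeatedly erase adjacent matched pairs
--     s = [c for c in text if c in '()[]{}']
--     while True:
--         t = _drop_pairs(s)
--         if len(t) == len(s):
--             break
--         s = t
--     if s:
--         return False, "Unbalanced parentheses, brackets, or braces"
--     return True, None
-- ===== Notes on version B (the rewrite author's own statement) =====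
-- stated objective: alternative
-- what changed: The single-pass stack matcher over the whole text is replaced by filtering out the bracket characters and repeatedly erasing adjacent matched open-close pairs until a pass removes nothing; the diagram is balanced iff nothing remains.
import Mathlib
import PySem

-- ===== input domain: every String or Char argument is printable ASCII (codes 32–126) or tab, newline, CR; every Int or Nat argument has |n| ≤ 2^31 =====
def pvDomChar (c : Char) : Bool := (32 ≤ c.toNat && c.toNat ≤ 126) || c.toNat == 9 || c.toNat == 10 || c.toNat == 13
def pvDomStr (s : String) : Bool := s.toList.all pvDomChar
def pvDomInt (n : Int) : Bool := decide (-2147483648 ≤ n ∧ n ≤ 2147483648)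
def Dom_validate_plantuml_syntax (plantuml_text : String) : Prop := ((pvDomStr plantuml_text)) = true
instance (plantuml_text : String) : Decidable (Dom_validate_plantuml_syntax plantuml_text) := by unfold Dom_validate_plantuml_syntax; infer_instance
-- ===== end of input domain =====

-- B replaces A's single-pass stack matcher by repeated elimination of adjacent matched
-- bracket pairs on the pre-filtered bracket characters (objective: alternative algorithm).

-- ===== PORT A =====
def pvAIsOpen (c : Char) : Bool := c == '(' || c == '[' || c == '{'

def pvAClose (c : Char) : Char := if c == '(' then ')' else if c == '[' then ']' else '}'

def pvAIsClose (c : Char) : Bool := c == ')' || c == ']' || c == '}'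

-- A's for-loop over the characters with the stack of expected closers; none = early return
def pvALoop (stack : List Char) : List Char → Option (List Char)
  | [] => some stack
  | c :: rest =>
    if pvAIsOpen c then pvALoop (pvAClose c :: stack) rest
    else if pvAIsClose c then
      match stack with
      | [] => none
      | d :: s' => if d == c then pvALoop s' rest else none
    else pvALoop stack rest

def validate_plantuml_syntax (plantuml_text : String) : Bool × Option String :=
  let text := PySem.Str.strip plantuml_text
  if text = "" then (false, some "Empty PlantUML text")
  else if !PySem.Str.startswith text "@startuml" && !PySem.Str.startswith text "@startmindmap"
          && !PySem.Str.startswith text "@startgantt" then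
    (false, some "PlantUML diagram must start with @startuml, @startmindmap, or @startgantt")
  else if !PySem.Str.endswith text "@enduml" && !PySem.Str.endswith text "@endmindmap"
          && !PySem.Str.endswith text "@endgantt" then
    (false, some "PlantUML diagram must end with @enduml, @endmindmap, or @endgantt")
  else
    match pvALoop [] text.toList with
    | none => (false, some "Unbalanced parentheses, brackets, or braces")
    | some [] => (true, none)
    | some (_ :: _) => (false, some "Unbalanced parentheses, brackets, or braces")

-- ===== PORT B =====
def pvIsPair (a b : Char) : Bool :=
  (a == '(' && b == ')') || (a == '[' && b == ']') || (a == '{' && b == '}')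

def pvIsBracket (c : Char) : Bool :=
  c == '(' || c == ')' || c == '[' || c == ']' || c == '{' || c == '}'

-- Source B's _drop_pairs: one pass removing non-overlapping adjacent matched pairs
def pvDropPairs : List Char → List Char
  | a :: b :: rest => if pvIsPair a b then pvDropPairs rest else a :: pvDropPairs (b :: rest)
  | l => l

theorem pvDropPairs_length_le (l : List Char) : (pvDropPairs l).length ≤ l.length := by
  induction l using pvDropPairs.induct with
  | case1 a b rest hp ih => simp [pvDropPairs, hp]; omega
  | case2 a b rest hp ih => simp [pvDropPairs, hp]; simpa using ih
  | case3 l h => simp [pvDropPairs]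

-- Source B's while-loop: eliminate pairs until a pass removes nothing
def pvElim (s : List Char) : List Char :=
  if _h : (pvDropPairs s).length = s.length then s else pvElim (pvDropPairs s)
termination_by s.length
decreasing_by have := pvDropPairs_length_le s; omega

def validate_plantuml_syntax_alt (plantuml_text : String) : Bool × Option String :=
  let text := PySem.Str.strip plantuml_text
  if text = "" then (false, some "Empty PlantUML text")
  else if !(PySem.Str.startswith text "@startuml" || PySem.Str.startswith text "@startmindmap"
            || PySem.Str.startswith text "@startgantt") then
    (false, some "PlantUML diagram must start with @startuml, @startmindmap, or @startgantt")
  else if !(PySem.Str.endswith text "@enduml" || PySem.Str.endswith text "@endmindmap"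
            || PySem.Str.endswith text "@endgantt") then
    (false, some "PlantUML diagram must end with @enduml, @endmindmap, or @endgantt")
  else
    let s := pvElim (text.toList.filter pvIsBracket)
    if s ≠ [] then (false, some "Unbalanced parentheses, brackets, or braces")
    else (true, none)

-- ===== PRECONDITION & SPEC =====
def Spec_validate_plantuml_syntax (plantuml_text : String) (out : Bool × Option String) : Prop := out = validate_plantuml_syntax_alt plantuml_text
instance (plantuml_text : String) (out : Bool × Option String) : Decidable (Spec_validate_plantuml_syntax plantuml_text out) := by unfold Spec_validate_plantuml_syntax; infer_instance

-- ===== CLAIM (what is proved, stated in full; the proofs are below) =====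
def Claim_equal_validate_plantuml_syntax : Prop := ∀ (plantuml_text : String), Dom_validate_plantuml_syntax plantuml_text → Spec_validate_plantuml_syntax plantuml_text (validate_plantuml_syntax plantuml_text)

-- ===== LEMMAS AND PROOFS =====

theorem pvBracket_cases (c : Char) :
    pvIsBracket c = (pvAIsOpen c || pvAIsClose c) := by
  unfold pvIsBracket pvAIsOpen pvAIsClose
  cases c == '(' <;> cases c == ')' <;> cases c == '[' <;> cases c == ']' <;>
    cases c == '{' <;> cases c == '}' <;> rfl

theorem pvPair_facts {a b : Char} (h : pvIsPair a b = true) :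
    pvAIsOpen a = true ∧ pvAClose a = b ∧ pvAIsClose b = true := by
  simp [pvIsPair] at h
  rcases h with (⟨h1, h2⟩ | ⟨h1, h2⟩) | ⟨h1, h2⟩ <;> subst h1 <;> subst h2 <;> decide

theorem pvPair_of (a b : Char) (ho : pvAIsOpen a = true) (he : pvAClose a = b) :
    pvIsPair a b = true := by
  simp [pvAIsOpen] at ho
  rcases ho with (h | h) | h <;> subst h <;> simp [pvAClose] at he <;> subst he <;> decide

theorem pvClose_not_open {b : Char} (h : pvAIsClose b = true) : pvAIsOpen b = false := by
  simp [pvAIsClose] at h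
  rcases h with (h | h) | h <;> subst h <;> decide

-- one congruent step of A's machine
theorem pvALoop_cons_cong {l₁ l₂ : List Char} (h : ∀ st, pvALoop st l₁ = pvALoop st l₂)
    (c : Char) (st : List Char) : pvALoop st (c :: l₁) = pvALoop st (c :: l₂) := by
  by_cases ho : pvAIsOpen c = true
  · simp only [pvALoop, ho, if_pos]; exact h _
  · by_cases hc : pvAIsClose c = true
    · simp only [pvALoop, ho, hc, if_pos, Bool.false_eq_true, if_false]
      cases st with
      | nil => rfl
      | cons d s' => by_cases hd : d = c <;> simp [hd, h]
    · simp only [pvALoop, ho, hc, Bool.false_eq_true, if_false]; exact h _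

-- non-bracket characters are no-ops: the machine only sees the filtered characters
theorem pvALoop_filter (l : List Char) : ∀ st,
    pvALoop st (l.filter pvIsBracket) = pvALoop st l := by
  induction l with
  | nil => intro st; rfl
  | cons c rest ih =>
    intro st
    have hbr := pvBracket_cases c
    cases hb : pvIsBracket c with
    | true =>
      simp only [List.filter_cons, hb, if_pos]
      exact pvALoop_cons_cong ih c st
    | false =>
      rw [hb] at hbr
      have ho : pvAIsOpen c = false := by
        cases h : pvAIsOpen c
        · rfl
        · rw [h] at hbr; simp at hbr
      have hc : pvAIsClose c = false := by
        cases h : pvAIsClose c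
        · rfl
        · rw [h] at hbr; simp at hbr
      simp only [List.filter_cons, hb, Bool.false_eq_true, if_false]
      rw [ih st]
      simp [pvALoop, ho, hc]

-- removing adjacent matched pairs does not change the machine's outcome
theorem pvALoop_dropPairs (l : List Char) : ∀ st,
    pvALoop st (pvDropPairs l) = pvALoop st l := by
  induction l using pvDropPairs.induct with
  | case1 a b rest hp ih =>
    intro st
    obtain ⟨ho, he, hc⟩ := pvPair_facts hp
    rw [pvDropPairs, if_pos hp, ih]
    simp [pvALoop, ho, hc, pvClose_not_open hc, he]
  | case2 a b rest hp ih =>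
    intro st
    rw [pvDropPairs, if_neg (by simp [hp])]
    exact pvALoop_cons_cong ih a st
  | case3 l h => intro st; cases l with
    | nil => rfl
    | cons a t => cases t with
      | nil => rfl
      | cons b r => exact absurd rfl (h a b r)

def pvHasPair : List Char → Bool
  | a :: b :: rest => pvIsPair a b || pvHasPair (b :: rest)
  | _ => false

theorem pvDropPairs_shrinks {l : List Char} (h : pvHasPair l = true) :
    (pvDropPairs l).length < l.length := by
  induction l using pvDropPairs.induct with
  | case1 a b rest hp ih =>
    have := pvDropPairs_length_le rest
    simp [pvDropPairs, hp]; omega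
  | case2 a b rest hp ih =>
    simp [pvHasPair, hp] at h
    have := ih h
    simp only [List.length_cons] at this ⊢
    simp [pvDropPairs, hp]
    omega
  | case3 l hl =>
    cases l with
    | nil => simp [pvHasPair] at h
    | cons a t => cases t with
      | nil => simp [pvHasPair] at h
      | cons b r => exact absurd rfl (hl a b r)

theorem pvDropPairs_all (p : Char → Bool) {l : List Char} (h : l.all p = true) :
    (pvDropPairs l).all p = true := by
  induction l using pvDropPairs.induct with
  | case1 a b rest hp ih =>
    rw [pvDropPairs, if_pos hp]
    simp at h
    exact ih (by simpa using h.2.2)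
  | case2 a b rest hp ih =>
    rw [pvDropPairs, if_neg (by simp [hp])]
    simp at h
    simp only [List.all_cons, h.1, Bool.true_and]
    refine ih ?_
    simp only [List.all_cons, h.2.1, Bool.true_and]
    simpa using h.2.2
  | case3 l hl => simpa [pvDropPairs] using h

-- an accepted bracket-only word either starts with a closer (impossible from the empty
-- stack) or contains an adjacent matched pair
theorem pvSuccess_hasPair : ∀ (rest : List Char) (a : Char) (st : List Char),
    (a :: rest).all pvIsBracket = true →
    pvALoop st (a :: rest) = some [] →
    pvAIsClose a = true ∨ pvHasPair (a :: rest) = true := by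
  intro rest
  induction rest with
  | nil =>
    intro a st hall hrun
    by_cases hc : pvAIsClose a = true
    · exact Or.inl hc
    · exfalso
      have ho : pvAIsOpen a = true := by
        have hbr := pvBracket_cases a
        simp at hall
        rw [hall] at hbr
        cases h : pvAIsOpen a
        · rw [h] at hbr; simp at hbr; exact absurd hbr hc
        · rfl
      simp [pvALoop, ho] at hrun
  | cons b rest' ih =>
    intro a st hall hrun
    by_cases hc : pvAIsClose a = true
    · exact Or.inl hc
    · right
      have ho : pvAIsOpen a = true := by
        have hbr := pvBracket_cases a
        simp at hall
        rw [hall.1] at hbr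
        cases h : pvAIsOpen a
        · rw [h] at hbr; simp at hbr; exact absurd hbr hc
        · rfl
      simp only [pvALoop, ho, if_pos] at hrun
      have hall' : (b :: rest').all pvIsBracket = true := by
        simp at hall ⊢; exact ⟨hall.2.1, hall.2.2⟩
      rcases ih b (pvAClose a :: st) hall' hrun with hb | hp
      · simp only [pvClose_not_open hb, hb, Bool.false_eq_true, if_false,
          if_true] at hrun
        by_cases hd : pvAClose a = b
        · have : pvIsPair a b = true := pvPair_of a b ho hd
          simp [pvHasPair, this]
        · simp [hd] at hrun
      · simp [pvHasPair, hp]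

theorem pvALoop_elim (l : List Char) : ∀ st, pvALoop st (pvElim l) = pvALoop st l := by
  induction l using pvElim.induct with
  | case1 s heq => intro st; rw [pvElim, dif_pos heq]
  | case2 s hne ih =>
    intro st
    rw [pvElim, dif_neg hne]
    exact (ih st).trans (pvALoop_dropPairs s st)

theorem pvElim_of_success : ∀ (l : List Char),
    l.all pvIsBracket = true → pvALoop [] l = some [] → pvElim l = [] := by
  intro l
  induction l using pvElim.induct with
  | case1 s heq =>
    intro hall hrun
    rw [pvElim, dif_pos heq]
    cases hs : s with
    | nil => rfl
    | cons a rest =>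
      exfalso
      subst hs
      rcases pvSuccess_hasPair rest a [] hall hrun with hc | hp
      · simp [pvALoop, pvClose_not_open hc, hc] at hrun
      · have := pvDropPairs_shrinks hp
        omega
  | case2 s hne ih =>
    intro hall hrun
    rw [pvElim, dif_neg hne]
    exact ih (pvDropPairs_all pvIsBracket hall)
      ((pvALoop_dropPairs s []).trans hrun)

-- ===== VERDICT (by name: the statement is the Claim_ definition above) =====
theorem validate_plantuml_syntax_spec : Claim_equal_validate_plantuml_syntax := by
  intro t _
  unfold Spec_validate_plantuml_syntax validate_plantuml_syntax validate_plantuml_syntax_alt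
  set text := PySem.Str.strip t with htext
  by_cases h0 : text = ""
  · simp [h0]
  · simp only [h0, if_false, Bool.not_or]
    set L := text.toList with hL
    have hfl : pvALoop [] (L.filter pvIsBracket) = pvALoop [] L := pvALoop_filter L []
    have key : pvElim (L.filter pvIsBracket) = [] ↔ pvALoop [] L = some [] := by
      constructor
      · intro h
        have h1 : pvALoop [] (pvElim (L.filter pvIsBracket)) = pvALoop [] (L.filter pvIsBracket) :=
          pvALoop_elim _ []
        rw [h] at h1
        rw [← hfl, ← h1]
        rfl
      · intro h
        exact pvElim_of_success _ (by simp) (hfl.trans h)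
    rcases hA : pvALoop [] L with _ | (_ | ⟨x, xs⟩)
    · have : pvElim (L.filter pvIsBracket) ≠ [] := by
        intro h; rw [key.mp h] at hA; cases hA
      simp [this]
    · simp [key.mpr hA]
    · have : pvElim (L.filter pvIsBracket) ≠ [] := by
        intro h; rw [key.mp h] at hA; cases hA
      simp [this]
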